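-- pv_equiv track=rewrite | github.com/impiyush83/code | codechef/COOK110B/twogrps.py | printTwoParts
-- ===== SOURCE A (Python) =====
-- def findSplitPoint(arr, n):
--     leftSum = 0
--     for i in range(0, n):
--         leftSum += arr[i]
--
--     rightSum = 0
--     for i in range(n - 1, -1, -1):
--
--         rightSum += arr[i]
--
--         leftSum -= arr[i]
--
--         if rightSum == leftSum:
--             return i
--
--     return -1
--
-- def printTwoParts(arr, n):
--     splitPoint = findSplitPoint(arr, n)
--
--     if splitPoint == -1 or splitPoint == n:
--         return 0
--
--     for i in range(0, n):
--         if splitPoint == i: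
--             pass
--         return arr[i]
-- ===== SOURCE B (Python) =====
-- def printTwoParts(arr, n):
--     prefixes = set()
--     p = 0
--     for i in range(n):
--         prefixes.add(p)
--         p += arr[i]
--     total = p
--     return arr[0] if any(2 * q == total for q in prefixes) else 0
-- ===== Notes on version B (the rewrite author's own statement) =====
-- stated objective: simpler
-- what changed: Replaces A's backward running-subtraction scan for a split point (plus a dead final loop that always returns arr[0]) with one forward pass that collects the set of prefix sums and answers by the membership test 2*p == total.
import Mathlib
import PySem

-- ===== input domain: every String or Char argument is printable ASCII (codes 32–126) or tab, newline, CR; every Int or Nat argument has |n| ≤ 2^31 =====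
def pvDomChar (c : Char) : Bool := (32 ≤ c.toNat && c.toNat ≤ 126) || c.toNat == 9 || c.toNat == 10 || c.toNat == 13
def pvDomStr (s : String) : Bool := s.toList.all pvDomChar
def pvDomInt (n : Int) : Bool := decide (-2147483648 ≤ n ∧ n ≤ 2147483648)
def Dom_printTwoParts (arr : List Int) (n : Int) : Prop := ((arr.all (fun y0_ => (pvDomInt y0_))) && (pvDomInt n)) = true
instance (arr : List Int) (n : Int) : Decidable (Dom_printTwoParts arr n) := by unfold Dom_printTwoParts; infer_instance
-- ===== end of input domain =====

-- B replaces A's backward running-subtraction scan (plus dead final loop) by one forward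
-- pass building a set of prefix sums and a membership test 2*p == total; same O(n) cost,
-- simpler structure.
-- Note on indexing: both ports read arr[i] with PySem.List.pyGetD arr i 0; under
-- Pre_printTwoParts (n ≤ len(arr)) every index accessed is in range, so this is exact.

-- ===== PORT A =====
-- the backward loop of findSplitPoint with its early return
def findSplitPointGo (arr : List Int) : List Int → Int → Int → Int
  | [], _, _ => -1
  | i :: rest, leftSum, rightSum =>
      let r := rightSum + PySem.List.pyGetD arr i 0
      let l := leftSum - PySem.List.pyGetD arr i 0
      if r = l then i else findSplitPointGo arr rest l r

def findSplitPoint (arr : List Int) (n : Int) : Int :=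
  let leftSum := (PySem.List.pyRange 0 n 1).foldl (fun s i => s + PySem.List.pyGetD arr i 0) 0
  findSplitPointGo arr (PySem.List.pyRange (n - 1) (-1) (-1)) leftSum 0

def printTwoParts (arr : List Int) (n : Int) : Int :=
  let splitPoint := findSplitPoint arr n
  if splitPoint = -1 ∨ splitPoint = n then 0
  else
    -- the final 'for i in range(0, n)' returns arr[0] on its first iteration;
    -- the [] case (Python would fall off and return None) is unreachable: splitPoint ≠ -1 forces n ≥ 1
    match PySem.List.pyRange 0 n 1 with
    | [] => 0
    | i :: _ => PySem.List.pyGetD arr i 0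

-- ===== PORT B =====
def printTwoParts_alt (arr : List Int) (n : Int) : Int :=
  let st := (PySem.List.pyRange 0 n 1).foldl
      (fun (st : PySem.Set Int × Int) i => (PySem.Set.add st.1 st.2, st.2 + PySem.List.pyGetD arr i 0))
      ((PySem.Set.empty : PySem.Set Int), 0)
  let total := st.2
  -- 'any' over the set: order-independent consumption
  if st.1.any (fun q => decide (2 * q = total)) then PySem.List.pyGetD arr 0 0 else 0

-- ===== PRECONDITION & SPEC =====
-- Pre_ excludes exactly the inputs where Python A raises IndexError: n > len(arr)
def Pre_printTwoParts (arr : List Int) (n : Int) : Prop := n ≤ (arr.length : Int)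
instance (arr : List Int) (n : Int) : Decidable (Pre_printTwoParts arr n) := by unfold Pre_printTwoParts; infer_instance
def pvWitness_printTwoParts : List Int × Int := ([1, 2, 3], 3)

def Spec_printTwoParts (arr : List Int) (n : Int) (out : Int) : Prop := out = printTwoParts_alt arr n
instance (arr : List Int) (n : Int) (out : Int) : Decidable (Spec_printTwoParts arr n out) := by unfold Spec_printTwoParts; infer_instance

-- ===== CLAIM (what is proved, stated in full; the proofs are below) =====
def Claim_equal_printTwoParts : Prop := ∀ (arr : List Int) (n : Int), Dom_printTwoParts arr n → Pre_printTwoParts arr n → Spec_printTwoParts arr n (printTwoParts arr n)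

-- ===== LEMMAS AND PROOFS =====

-- prefix sum of the first j elements, read the way both ports read them
def pref (arr : List Int) (j : Nat) : Int :=
  ((List.range j).map (fun k : Nat => PySem.List.pyGetD arr (k : Int) 0)).sum

theorem pref_succ (arr : List Int) (j : Nat) :
    pref arr (j + 1) = pref arr j + PySem.List.pyGetD arr (j : Int) 0 := by
  simp [pref, List.range_succ]

theorem foldl_add_sum (f : Int → Int) (l : List Int) (c : Int) :
    l.foldl (fun s i => s + f i) c = c + (l.map f).sum := by
  induction l generalizing c with
  | nil => simp
  | cons x xs ih => simp [List.foldl_cons, ih]; ring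

-- A's first loop computes the full prefix sum
theorem leftSum_eq (arr : List Int) (m : Nat) :
    (PySem.List.pyRange 0 (m : Int) 1).foldl (fun s i => s + PySem.List.pyGetD arr i 0) 0
      = pref arr m := by
  rw [PySem.List.pyRange_zero_natCast, foldl_add_sum]
  unfold pref
  rw [List.map_map]
  simp only [Function.comp_def, zero_add]

-- generic: findSplitPointGo returns -1 or a member of its list
theorem goA_mem (arr : List Int) (L : List Int) (ls rs : Int) :
    findSplitPointGo arr L ls rs = -1 ∨ findSplitPointGo arr L ls rs ∈ L := by
  induction L generalizing ls rs with
  | nil => left; rfl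
  | cons i rest ih =>
      simp only [findSplitPointGo]
      split_ifs with h
      · right; exact List.mem_cons_self
      · rcases ih (ls - PySem.List.pyGetD arr i 0) (rs + PySem.List.pyGetD arr i 0) with h1 | h1
        · left; exact h1
        · right; exact List.mem_cons_of_mem _ h1

-- invariant of A's backward scan
theorem goA_iff (arr : List Int) (T : Int) (j : Nat) :
    (findSplitPointGo arr (PySem.List.pyRange ((j : Int) - 1) (-1) (-1)) (pref arr j) (T - pref arr j) = -1)
      ↔ ¬ ∃ k < j, 2 * pref arr k = T := by
  induction j with
  | zero =>
      rw [PySem.List.pyRange_neg_one_eq_nil (by norm_num)]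
      simp [findSplitPointGo]
  | succ j ih =>
      have hcons : PySem.List.pyRange ((↑(j + 1) : Int) - 1) (-1) (-1)
          = (j : Int) :: PySem.List.pyRange ((j : Int) - 1) (-1) (-1) := by
        have : ((↑(j + 1) : Int) - 1) = (j : Int) := by push_cast; ring
        rw [this, PySem.List.pyRange_neg_one_cons (by omega)]
      rw [hcons]
      simp only [findSplitPointGo]
      have hps := pref_succ arr j
      have hr : T - pref arr (j + 1) + PySem.List.pyGetD arr (j : Int) 0 = T - pref arr j := by
        rw [hps]; ring
      have hl : pref arr (j + 1) - PySem.List.pyGetD arr (j : Int) 0 = pref arr j := by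
        rw [hps]; ring
      rw [hr, hl]
      split_ifs with h
      · constructor
        · intro hj
          exfalso
          have hj0 : (0 : Int) ≤ (j : Int) := Int.natCast_nonneg j
          omega
        · intro hno
          exact (hno ⟨j, Nat.lt_succ_self j, by linarith⟩).elim
      · rw [ih]
        constructor
        · intro hno ⟨k, hk, hke⟩
          rcases Nat.lt_succ_iff_lt_or_eq.mp hk with hk' | hk'
          · exact hno ⟨k, hk', hke⟩
          · subst hk'; exact h (by linarith)
        · intro hno ⟨k, hk, hke⟩
          exact hno ⟨k, Nat.lt_succ_of_lt hk, hke⟩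

-- invariant of B's forward fold
theorem foldB_spec (arr : List Int) (m : Nat) :
    (((List.range m).map (fun k : Nat => (k : Int))).foldl
        (fun (st : PySem.Set Int × Int) i => (PySem.Set.add st.1 st.2, st.2 + PySem.List.pyGetD arr i 0))
        ((PySem.Set.empty : PySem.Set Int), 0)).2 = pref arr m
    ∧ ∀ x, x ∈ (((List.range m).map (fun k : Nat => (k : Int))).foldl
        (fun (st : PySem.Set Int × Int) i => (PySem.Set.add st.1 st.2, st.2 + PySem.List.pyGetD arr i 0))
        ((PySem.Set.empty : PySem.Set Int), 0)).1 ↔ ∃ k < m, x = pref arr k := by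
  induction m with
  | zero =>
      refine ⟨rfl, fun x => ?_⟩
      simp only [List.range_zero, List.map_nil, List.foldl_nil]
      constructor
      · intro hx; exact absurd hx (List.not_mem_nil)
      · rintro ⟨k, hk, _⟩; exact absurd hk (Nat.not_lt_zero k)
  | succ m ih =>
      rw [List.range_succ]
      simp only [List.map_append, List.foldl_append, List.map_cons, List.map_nil,
        List.foldl_cons, List.foldl_nil]
      obtain ⟨ih2, ih1⟩ := ih
      refine ⟨by rw [ih2, pref_succ], fun x => ?_⟩
      rw [PySem.Set.mem_add, ih1 x, ih2]
      constructor
      · rintro (⟨k, hk, rfl⟩ | rfl)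
        · exact ⟨k, Nat.lt_succ_of_lt hk, rfl⟩
        · exact ⟨m, Nat.lt_succ_self m, rfl⟩
      · rintro ⟨k, hk, rfl⟩
        rcases Nat.lt_succ_iff_lt_or_eq.mp hk with hk' | hk'
        · exact Or.inl ⟨k, hk', rfl⟩
        · subst hk'; exact Or.inr rfl

theorem pyRange_cast (m : Nat) :
    PySem.List.pyRange 0 (m : Int) 1 = (List.range m).map (fun k : Nat => (k : Int)) := by
  exact PySem.List.pyRange_zero_natCast m

-- B characterized through pref
theorem alt_eq (arr : List Int) (m : Nat) :
    printTwoParts_alt arr (m : Int)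
      = if ∃ k < m, 2 * pref arr k = pref arr m then PySem.List.pyGetD arr 0 0 else 0 := by
  unfold printTwoParts_alt
  rw [pyRange_cast]
  obtain ⟨h2, h1⟩ := foldB_spec arr m
  simp only [h2]
  by_cases hex : ∃ k < m, 2 * pref arr k = pref arr m
  · obtain ⟨k, hk, hke⟩ := hex
    rw [if_pos, if_pos ⟨k, hk, hke⟩]
    rw [List.any_eq_true]
    exact ⟨pref arr k, (h1 _).mpr ⟨k, hk, rfl⟩, by simpa using hke⟩
  · rw [if_neg, if_neg hex]
    rw [List.any_eq_true]
    rintro ⟨x, hx, hxe⟩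
    obtain ⟨k, hk, rfl⟩ := (h1 x).mp hx
    exact hex ⟨k, hk, by simpa using hxe⟩

-- A characterized through pref
theorem a_eq (arr : List Int) (m : Nat) :
    printTwoParts arr (m : Int)
      = if ∃ k < m, 2 * pref arr k = pref arr m then PySem.List.pyGetD arr 0 0 else 0 := by
  unfold printTwoParts findSplitPoint
  rw [leftSum_eq]
  have hcall : findSplitPointGo arr (PySem.List.pyRange ((m : Int) - 1) (-1) (-1)) (pref arr m) 0
      = findSplitPointGo arr (PySem.List.pyRange ((m : Int) - 1) (-1) (-1)) (pref arr m)
          (pref arr m - pref arr m) := by rw [sub_self]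
  by_cases hex : ∃ k < m, 2 * pref arr k = pref arr m
  · have hne : findSplitPointGo arr (PySem.List.pyRange ((m : Int) - 1) (-1) (-1)) (pref arr m) 0 ≠ -1 := by
      rw [hcall]
      intro hEq
      exact ((goA_iff arr (pref arr m) m).mp hEq) hex
    have hmem : findSplitPointGo arr (PySem.List.pyRange ((m : Int) - 1) (-1) (-1)) (pref arr m) 0
        ∈ PySem.List.pyRange ((m : Int) - 1) (-1) (-1) := by
      rcases goA_mem arr _ (pref arr m) 0 with h | h
      · exact absurd h hne
      · exact h
    have hlt := (PySem.List.mem_pyRange_neg_one.mp hmem)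
    have hm1 : 1 ≤ m := by
      obtain ⟨k, hk, _⟩ := hex; omega
    rw [if_neg, if_pos hex]
    · rw [PySem.List.pyRange_one_cons (by exact_mod_cast hm1)]
    · push Not
      refine ⟨hne, ?_⟩
      intro hEq
      have := hlt.2
      rw [hEq] at this
      omega
  · have h1 : findSplitPointGo arr (PySem.List.pyRange ((m : Int) - 1) (-1) (-1)) (pref arr m) 0 = -1 := by
      rw [hcall]
      exact (goA_iff arr (pref arr m) m).mpr hex
    rw [if_pos (Or.inl h1), if_neg hex]

-- ===== VERDICT (by name: the statement is the Claim_ definition above) =====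
theorem printTwoParts_spec : Claim_equal_printTwoParts := by
  intro arr n _ _
  unfold Spec_printTwoParts
  by_cases hn : 0 ≤ n
  · obtain ⟨m, rfl⟩ := Int.eq_ofNat_of_zero_le hn
    rw [a_eq, alt_eq]
  · -- n < 0: both loops are empty, both return 0
    have hnil1 : PySem.List.pyRange 0 n 1 = [] :=
      PySem.List.pyRange_one_eq_nil (by omega)
    have hnil2 : PySem.List.pyRange (n - 1) (-1) (-1) = [] :=
      PySem.List.pyRange_neg_one_eq_nil (by omega)
    unfold printTwoParts printTwoParts_alt findSplitPoint
    rw [hnil1, hnil2]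
    simp [findSplitPointGo, PySem.Set.empty]
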